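-- pv_equiv track=rewrite | github.com/fredrbl/energyEth | python/trade_5min.py | setFlexibility
-- ===== SOURCE A (Python) =====
-- def setFlexibility(battery):
--     # 5000 w in one hour = 5000 wh => 833 w max in 10 minutes
--     availableFlex = [[0 for x in range(6)] for y in range(2)]
--     for i in range(0,6,2):
--         if (battery[i] > 840 and battery[i] < 12500):
--             availableFlex[0][i] = 700
--             availableFlex[1][i] = 700
--         elif (battery[i] <= 840):
--             availableFlex[0][i] = 0
--             availableFlex[1][i] = 700
--         elif (battery[i] >= 12500):
--             availableFlex[0][i] = 700
--             availableFlex[1][i] = 0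
--     return availableFlex
-- ===== SOURCE B (Python) =====
-- # Table-driven: classify each even slot into a code, look up the (down, up)
-- # pair in a constant table, then unzip the pairs into the two rows.
-- FLEX_TABLE = {0: (700, 700), 1: (0, 700), 2: (700, 0)}
--
-- def setFlexibility(battery):
--     pairs = [FLEX_TABLE[(battery[i] <= 840) + 2 * (battery[i] >= 12500)]
--              for i in (0, 2, 4)]
--     down, up = [], []
--     for d, u in pairs:
--         down += [d, 0]
--         up += [u, 0]
--     return [down, up]
-- ===== Notes on version B (the rewrite author's own statement) =====
-- stated objective: alternative
-- what changed: Replaces the in-place 2x6 matrix with three-way if/elif branching by a table-driven scheme: each even slot is mapped to a 2-bit classification code, the (down, up) pair is looked up in a constant dict, and the pairs are unzipped into the two rows with interleaved zeros.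
import Mathlib
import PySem

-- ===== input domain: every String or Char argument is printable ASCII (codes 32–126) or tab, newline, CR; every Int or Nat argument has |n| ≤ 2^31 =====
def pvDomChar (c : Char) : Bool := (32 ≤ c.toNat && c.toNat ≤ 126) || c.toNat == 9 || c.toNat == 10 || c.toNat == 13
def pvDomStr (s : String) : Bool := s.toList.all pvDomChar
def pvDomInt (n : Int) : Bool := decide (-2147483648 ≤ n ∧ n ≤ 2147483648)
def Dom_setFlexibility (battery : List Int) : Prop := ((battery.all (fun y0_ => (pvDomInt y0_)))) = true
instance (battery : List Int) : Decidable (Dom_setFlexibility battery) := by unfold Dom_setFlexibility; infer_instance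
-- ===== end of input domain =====

-- B replaces A's mutable 2x6 array and three-way if/elif with a table-driven scheme:
-- per-slot classification code, constant-dict lookup of the (down, up) pair, then
-- unzipping the pairs into the two rows (objective: alternative).


-- ===== PORT A =====
-- the loop body of A: read battery[i], three-way branch, assign both rows in place
-- (pyGetD/pySetD are the total forms, exact under Pre_: every index used is in range)
def setFlexStep (battery : List Int) (flex : List (List Int)) (i : Int) : List (List Int) :=
  let b := PySem.List.pyGetD battery i 0
  if b > 840 ∧ b < 12500 then
    let flex := PySem.List.pySetD flex 0 (PySem.List.pySetD (PySem.List.pyGetD flex 0 []) i 700)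
    PySem.List.pySetD flex 1 (PySem.List.pySetD (PySem.List.pyGetD flex 1 []) i 700)
  else if b ≤ 840 then
    let flex := PySem.List.pySetD flex 0 (PySem.List.pySetD (PySem.List.pyGetD flex 0 []) i 0)
    PySem.List.pySetD flex 1 (PySem.List.pySetD (PySem.List.pyGetD flex 1 []) i 700)
  else if b ≥ 12500 then
    let flex := PySem.List.pySetD flex 0 (PySem.List.pySetD (PySem.List.pyGetD flex 0 []) i 700)
    PySem.List.pySetD flex 1 (PySem.List.pySetD (PySem.List.pyGetD flex 1 []) i 0)
  else flex

-- transliteration of A: 2x6 zero matrix, then for i in range(0, 6, 2) run the loop body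
def setFlexibility (battery : List Int) : List (List Int) :=
  let availableFlex : List (List Int) :=
    (PySem.List.pyRange 0 2 1).map (fun _ => (PySem.List.pyRange 0 6 1).map (fun _ => (0 : Int)))
  (PySem.List.pyRange 0 6 2).foldl (setFlexStep battery) availableFlex

-- ===== PORT B =====
-- the constant dict FLEX_TABLE = {0: (700, 700), 1: (0, 700), 2: (700, 0)}
def flexTable : PySem.Dict Int (Int × Int) :=
  PySem.Dict.ofList [(0, (700, 700)), (1, (0, 700)), (2, (700, 0))]

-- transliteration of B: classification codes, table lookup, then unzip with zeros.
-- FLEX_TABLE[code] is exact as getD since the code is always a present key (0, 1 or 2).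
def setFlexibility_alt (battery : List Int) : List (List Int) :=
  let pairs := ([0, 2, 4] : List Int).map (fun i =>
    let b := PySem.List.pyGetD battery i 0
    PySem.Dict.getD flexTable
      ((if b ≤ 840 then (1 : Int) else 0) + 2 * (if b ≥ 12500 then 1 else 0)) (0, 0))
  let f := pairs.foldl
    (fun (s : List Int × List Int) p => (s.1 ++ [p.1, 0], s.2 ++ [p.2, 0])) ([], [])
  [f.1, f.2]

-- ===== PRECONDITION & SPEC =====
-- both Pythons index battery[0], battery[2], battery[4]: IndexError on shorter lists
def Pre_setFlexibility (battery : List Int) : Prop := 5 ≤ battery.length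
instance (battery : List Int) : Decidable (Pre_setFlexibility battery) := by unfold Pre_setFlexibility; infer_instance
def pvWitness_setFlexibility : List Int := [1000, 0, 500, 0, 20000]

def Spec_setFlexibility (battery : List Int) (out : List (List Int)) : Prop := out = setFlexibility_alt battery
instance (battery : List Int) (out : List (List Int)) : Decidable (Spec_setFlexibility battery out) := by unfold Spec_setFlexibility; infer_instance

-- ===== CLAIM (what is proved, stated in full; the proofs are below) =====
def Claim_equal_setFlexibility : Prop := ∀ (battery : List Int), Dom_setFlexibility battery → Pre_setFlexibility battery → Spec_setFlexibility battery (setFlexibility battery)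

-- ===== LEMMAS AND PROOFS =====

-- A's three branches are exhaustive and each writes both rows: on a two-row state the
-- step sets row 0 by the test b > 840 and row 1 by the test b < 12500.
theorem setFlexStep_eq (battery : List Int) (r0 r1 : List Int) (i : Int) :
    setFlexStep battery [r0, r1] i =
      [PySem.List.pySetD r0 i (if 840 < PySem.List.pyGetD battery i 0 then 700 else 0),
       PySem.List.pySetD r1 i (if PySem.List.pyGetD battery i 0 < 12500 then 700 else 0)] := by
  unfold setFlexStep
  set b := PySem.List.pyGetD battery i 0 with hb
  have h0 : PySem.List.pyGetD ([r0, r1] : List (List Int)) 0 [] = r0 := by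
    simp [PySem.List.pyGetD, PySem.List.pyGet?, PySem.List.pyIdx?]
  have hs0 : ∀ x, PySem.List.pySetD ([r0, r1] : List (List Int)) 0 x = [x, r1] := by
    intro x; simp [PySem.List.pySetD, PySem.List.pySet?, PySem.List.pyIdx?]
  have h1 : ∀ x, PySem.List.pyGetD ([x, r1] : List (List Int)) 1 [] = r1 := by
    intro x; simp [PySem.List.pyGetD, PySem.List.pyGet?, PySem.List.pyIdx?]
  have hs1 : ∀ x y, PySem.List.pySetD ([x, r1] : List (List Int)) 1 y = [x, y] := by
    intro x y; simp [PySem.List.pySetD, PySem.List.pySet?, PySem.List.pyIdx?]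
  by_cases c1 : (840 : Int) < b
  · by_cases c2 : b < 12500
    · rw [if_pos ⟨c1, c2⟩]; simp only [h0, hs0, h1, hs1]; rw [if_pos c1, if_pos c2]
    · rw [if_neg (by omega), if_neg (by omega), if_pos (by omega)]
      simp only [h0, hs0, h1, hs1]; rw [if_pos c1, if_neg c2]
  · have c2 : b < 12500 := by omega
    rw [if_neg (by omega), if_pos (by omega)]
    simp only [h0, hs0, h1, hs1]; rw [if_neg c1, if_pos c2]

-- B's table lookup at the classification code of b is the pair of single-threshold values
theorem flexTable_code (b : Int) :
    PySem.Dict.getD flexTable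
        ((if b ≤ 840 then (1 : Int) else 0) + 2 * (if b ≥ 12500 then 1 else 0)) (0, 0) =
      ((if 840 < b then (700 : Int) else 0), (if b < 12500 then (700 : Int) else 0)) := by
  by_cases c1 : b ≤ 840
  · have c2 : b < 12500 := by omega
    rw [if_pos c1, if_neg (by omega), if_neg (by omega), if_pos c2]
    decide
  · by_cases c2 : b ≥ 12500
    · rw [if_neg c1, if_pos c2, if_pos (by omega), if_neg (by omega)]
      decide
    · rw [if_neg c1, if_neg c2, if_pos (by omega), if_pos (by omega)]
      decide

-- ===== VERDICT (by name: the statement is the Claim_ definition above) =====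
theorem setFlexibility_spec : Claim_equal_setFlexibility := by
  intro battery _ hpre
  unfold Pre_setFlexibility at hpre
  unfold Spec_setFlexibility setFlexibility setFlexibility_alt
  rw [show PySem.List.pyRange 0 6 2 = [0, 2, 4] from by decide,
      show PySem.List.pyRange 0 6 1 = [0, 1, 2, 3, 4, 5] from by decide,
      show PySem.List.pyRange 0 2 1 = [0, 1] from by decide]
  simp only [List.map, List.foldl, setFlexStep_eq, flexTable_code]
  match battery, hpre with
  | b0 :: b1 :: b2 :: b3 :: b4 :: rest, _ =>
    simp [PySem.List.pySetD, PySem.List.pySet?, PySem.List.pyIdx?,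
      PySem.List.pyGetD, PySem.List.pyGet?]
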